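-- pv_equiv track=rewrite | github.com/49458Barradas/CD-G20-2 | Exer2/cRead.py | get_fletcher32
-- ===== SOURCE A (Python) =====
-- def get_fletcher32(data: str):
--     """
--     Accepts a string as input.
--     Returns the Fletcher32 checksum value in decimal and hexadecimal format.
--     16-bit implementation (32-bit checksum)
--     """
--     sum1, sum2 = int(), int()
--     data = data.encode()
--     for index in range(len(data)):
--         sum1 = (sum1 + data[index]) % 65535
--         sum2 = (sum2 + sum1) % 65535
--     result = (sum2 << 16) | sum1
--     return result
-- ===== SOURCE B (Python) =====
-- def get_fletcher32(data: str):
--     """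
--     Accepts a string as input.
--     Returns the Fletcher32 checksum value in decimal and hexadecimal format.
--     16-bit implementation (32-bit checksum)
--     """
--     b = data.encode()
--     n = len(b)
--     sum1 = sum(b) % 65535
--     sum2 = sum((n - i) * x for i, x in enumerate(b)) % 65535
--     return (sum2 << 16) | sum1
-- ===== Notes on version B (the rewrite author's own statement) =====
-- stated objective: simpler
-- what changed: Replaces the two coupled per-byte mod-65535 accumulators with a single weighted closed form: sum1 is the plain byte total and sum2 the weighted sum of (n-i)*byte, each reduced mod 65535 once at the end.
import Mathlib
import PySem

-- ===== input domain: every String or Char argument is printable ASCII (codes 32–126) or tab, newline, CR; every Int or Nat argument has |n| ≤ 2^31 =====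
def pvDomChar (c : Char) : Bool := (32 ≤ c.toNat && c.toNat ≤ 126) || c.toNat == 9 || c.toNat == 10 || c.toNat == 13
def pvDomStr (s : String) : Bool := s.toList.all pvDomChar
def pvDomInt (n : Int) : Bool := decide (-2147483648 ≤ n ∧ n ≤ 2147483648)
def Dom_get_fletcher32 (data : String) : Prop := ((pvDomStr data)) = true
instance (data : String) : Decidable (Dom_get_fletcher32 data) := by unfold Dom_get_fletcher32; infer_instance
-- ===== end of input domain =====

-- B replaces A's two coupled per-byte mod-65535 accumulators by one weighted closed form
-- (sum1 = plain byte total, sum2 = Σ (n-i)*byte, each reduced mod 65535 once); objective: simpler.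

-- ===== PORT A =====
-- data.encode(): on the ASCII domain each byte equals the character's code point.
def get_fletcher32 (data : String) : Int :=
  let bytes := data.toList.map (fun c => (c.toNat : Int))
  let p := bytes.foldl (fun (p : Int × Int) b =>
      let s1 := (p.1 + b) % 65535
      (s1, (p.2 + s1) % 65535)) (0, 0)
  -- (sum2 << 16) | sum1: exact as sum2 * 65536 + sum1 here, since 0 ≤ sum1 < 2^16 ≤ sum2's shift
  p.2 * 65536 + p.1

-- ===== PORT B =====
def get_fletcher32_alt (data : String) : Int :=
  let bytes := data.toList.map (fun c => (c.toNat : Int))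
  let n : Int := bytes.length
  let sum1 := (bytes.foldl (· + ·) 0) % 65535
  let sum2 := (((PySem.List.enumerate bytes).map (fun q => (n - q.1) * q.2)).foldl (· + ·) 0) % 65535
  -- (sum2 << 16) | sum1: exact as sum2 * 65536 + sum1 here, since 0 ≤ sum1 < 2^16 ≤ sum2's shift
  sum2 * 65536 + sum1

-- ===== PRECONDITION & SPEC =====
def Spec_get_fletcher32 (data : String) (out : Int) : Prop := out = get_fletcher32_alt data
instance (data : String) (out : Int) : Decidable (Spec_get_fletcher32 data out) := by unfold Spec_get_fletcher32; infer_instance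

-- ===== CLAIM (what is proved, stated in full; the proofs are below) =====
def Claim_equal_get_fletcher32 : Prop := ∀ (data : String), Dom_get_fletcher32 data → Spec_get_fletcher32 data (get_fletcher32 data)

-- ===== LEMMAS AND PROOFS =====

/-- Weighted byte sum: element at distance k from the end gets weight k+1. -/
def pvW : List Int → Int
  | [] => 0
  | b :: t => ((t.length : Int) + 1) * b + pvW t

lemma pv_foldl_add (l : List Int) (a : Int) : l.foldl (· + ·) a = a + l.sum := by
  induction l generalizing a with
  | nil => simp
  | cons b t ih => simp [ih]; ring

lemma pv_fold_inv (l : List Int) (a1 a2 : Int) :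
    l.foldl (fun (p : Int × Int) b =>
      let s1 := (p.1 + b) % 65535
      (s1, (p.2 + s1) % 65535)) (a1 % 65535, a2 % 65535)
    = ((a1 + l.sum) % 65535, (a2 + (l.length : Int) * a1 + pvW l) % 65535) := by
  induction l generalizing a1 a2 with
  | nil => simp [pvW]
  | cons b t ih =>
    simp only [List.foldl_cons]
    have h1 : (a1 % 65535 + b) % 65535 = (a1 + b) % 65535 := by omega
    have h2 : (a2 % 65535 + (a1 + b) % 65535) % 65535 = (a2 + a1 + b) % 65535 := by omega
    rw [h1, h2, ih (a1 + b) (a2 + a1 + b)]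
    simp only [Prod.mk.injEq, List.sum_cons, List.length_cons, pvW]
    constructor
    · ring_nf
    · push_cast; ring_nf

lemma pv_enum_sum (l : List Int) (N s : Int) (h : N = s + l.length) :
    ((PySem.List.enumerate l s).map (fun q => (N - q.1) * q.2)).sum = pvW l := by
  induction l generalizing s with
  | nil => simp [PySem.List.enumerate_nil, pvW]
  | cons b t ih =>
    rw [PySem.List.enumerate_cons]
    simp only [List.map_cons, List.sum_cons, pvW]
    rw [ih (s + 1) (by simp only [List.length_cons] at h; push_cast at h ⊢; omega)]
    have hw : N - s = (t.length : Int) + 1 := by simp only [List.length_cons] at h; push_cast at h; omega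
    rw [hw]

-- ===== VERDICT (by name: the statement is the Claim_ definition above) =====
theorem get_fletcher32_spec : Claim_equal_get_fletcher32 := by
  intro data _
  unfold Spec_get_fletcher32 get_fletcher32 get_fletcher32_alt
  simp only []
  have h0 : ((0 : Int), (0 : Int)) = ((0 : Int) % 65535, (0 : Int) % 65535) := by decide
  rw [h0, pv_fold_inv, pv_foldl_add, pv_foldl_add,
      pv_enum_sum (data.toList.map (fun c => (c.toNat : Int))) _ 0 (by simp)]
  simp
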